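-- pv_equiv track=rewrite | github.com/niusealeo/hyper-dimensional-Phragmen | engine.py | tie_break_by_party_order
-- ===== SOURCE A (Python) =====
-- from typing import Any, Dict, List, Optional, Set, Tuple
--
-- def party_rank_maps(party_lists: Dict[str, List[str]]) -> Dict[str, Dict[str, int]]:
--     return {pid: {c: i for i, c in enumerate(lst)} for pid, lst in party_lists.items()}
--
-- def tie_break_by_party_order(tied_candidates: List[str], party_lists: Dict[str, List[str]]) -> str:
--     rank_maps = party_rank_maps(party_lists)
--     best = None  # (rank_index, candidate)
--     for c in tied_candidates:
--         best_rank = None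
--         for rm in rank_maps.values():
--             if c in rm:
--                 r = rm[c]
--                 if best_rank is None or r < best_rank:
--                     best_rank = r
--         if best_rank is not None:
--             key = (best_rank, c)
--             if best is None or key < best:
--                 best = key
--     return best[1] if best is not None else min(tied_candidates)
-- ===== SOURCE B (Python) =====
-- def tie_break_by_party_order(tied_candidates, party_lists):
--     # one flat table candidate -> best (min over parties) rank; within a party the
--     # last occurrence's index wins (as in dict comprehension over enumerate)
--     best_rank = {}
--     for lst in party_lists.values():
--         local = {}
--         for i, c in enumerate(lst):
--             local[c] = i
--         for c, r in local.items():
--             old = best_rank.get(c)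
--             if old is None:
--                 best_rank[c] = r
--             elif r < old:
--                 best_rank[c] = r
--     winner = None
--     for c in tied_candidates:
--         r = best_rank.get(c)
--         if r is not None:
--             if winner is None or (r, c) < winner:
--                 winner = (r, c)
--     return winner[1] if winner is not None else min(tied_candidates)
-- ===== Notes on version B (the rewrite author's own statement) =====
-- stated objective: faster
-- what changed: B precomputes one flat candidate->best-rank dict in a single pass over the party lists (per-party last-occurrence dict merged into a global table by min), so the tied-candidates loop does one dict lookup each instead of A's scan over all party rank maps per tied candidate.
import Mathlib
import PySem

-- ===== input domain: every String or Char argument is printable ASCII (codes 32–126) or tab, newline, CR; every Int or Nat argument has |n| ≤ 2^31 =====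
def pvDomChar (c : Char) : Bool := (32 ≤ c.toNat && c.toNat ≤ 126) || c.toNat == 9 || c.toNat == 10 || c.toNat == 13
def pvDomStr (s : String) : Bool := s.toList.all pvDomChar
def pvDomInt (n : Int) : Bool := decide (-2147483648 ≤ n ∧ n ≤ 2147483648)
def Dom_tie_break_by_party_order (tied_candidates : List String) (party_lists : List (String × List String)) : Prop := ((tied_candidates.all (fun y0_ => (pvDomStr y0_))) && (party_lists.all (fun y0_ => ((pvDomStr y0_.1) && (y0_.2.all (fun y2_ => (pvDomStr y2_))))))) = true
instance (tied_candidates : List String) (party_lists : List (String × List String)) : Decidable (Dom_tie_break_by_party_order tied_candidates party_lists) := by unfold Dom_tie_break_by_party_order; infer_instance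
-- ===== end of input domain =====

-- B replaces A's per-tied-candidate scan over all party rank maps by one flat
-- candidate→best-rank table built in a single pass over the party lists.

-- ===== PORT A =====
-- {c: i for i, c in enumerate(lst)} (last occurrence wins)
def pvEnumDict (lst : List String) : PySem.Dict String Int :=
  (PySem.List.enumerate lst 0).foldl (fun m ic => m.insert ic.2 ic.1) PySem.Dict.empty

-- party_rank_maps: {pid: {c: i for i, c in enumerate(lst)} for pid, lst in party_lists.items()}
def party_rank_maps (d : PySem.Dict String (List String)) : PySem.Dict String (PySem.Dict String Int) :=
  d.items.foldl (fun acc p => acc.insert p.1 (pvEnumDict p.2)) PySem.Dict.empty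

-- the inner loop of A: best_rank accumulation over the rank maps
def pvAInner (c : String) (br : Option Int) (rm : PySem.Dict String Int) : Option Int :=
  match rm.get? c with            -- if c in rm: r = rm[c]
  | none => br
  | some r =>
    match br with
    | none => some r
    | some b => if r < b then some r else br

-- the outer loop body of A: key = (best_rank, c); if best is None or key < best
def pvAOuter (rms : List (PySem.Dict String Int)) (best : Option (Int × String)) (c : String) :
    Option (Int × String) :=
  match rms.foldl (pvAInner c) none with
  | none => best
  | some r =>
    match best with
    | none => some (r, c)
    | some b => if r < b.1 ∨ (r = b.1 ∧ c < b.2) then some (r, c) else best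

def tie_break_by_party_order (tied_candidates : List String) (party_lists : List (String × List String)) : String :=
  let rank_maps := party_rank_maps (PySem.Dict.ofList party_lists)
  match tied_candidates.foldl (pvAOuter rank_maps.values) none with
  | some b => b.2
  | none => (PySem.List.min? tied_candidates (fun x => x)).getD ""   -- min([]) raises: outside Pre_

-- ===== PORT B =====
-- merge one (candidate, rank) pair of a party's local dict into the global table by min
def pvBMergeInto (t : PySem.Dict String Int) (cr : String × Int) : PySem.Dict String Int :=
  match t.get? cr.1 with
  | none => t.insert cr.1 cr.2
  | some r0 => if cr.2 < r0 then t.insert cr.1 cr.2 else t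

-- process one party list: build local[c] = i (last occurrence), merge into table
def pvBMergeList (t : PySem.Dict String Int) (lst : List String) : PySem.Dict String Int :=
  ((PySem.List.enumerate lst 0).foldl (fun m ic => m.insert ic.2 ic.1) PySem.Dict.empty).items.foldl
    pvBMergeInto t

-- winner-tracking loop body of B: one table lookup per tied candidate
def pvBStep (table : PySem.Dict String Int) (w : Option (Int × String)) (c : String) :
    Option (Int × String) :=
  match table.get? c with
  | none => w
  | some r =>
    match w with
    | none => some (r, c)
    | some b => if r < b.1 ∨ (r = b.1 ∧ c < b.2) then some (r, c) else w

def tie_break_by_party_order_alt (tied_candidates : List String) (party_lists : List (String × List String)) : String :=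
  let table := (PySem.Dict.ofList party_lists).values.foldl pvBMergeList PySem.Dict.empty
  match tied_candidates.foldl (pvBStep table) none with
  | some b => b.2
  | none => (PySem.List.min? tied_candidates (fun x => x)).getD ""   -- min([]) raises: outside Pre_

-- ===== PRECONDITION & SPEC =====
-- Pre_ excludes only tied_candidates = [], where the Python A raises ValueError (min of empty sequence).
def Pre_tie_break_by_party_order (tied_candidates : List String) (party_lists : List (String × List String)) : Prop :=
  tied_candidates ≠ []
instance (tied_candidates : List String) (party_lists : List (String × List String)) : Decidable (Pre_tie_break_by_party_order tied_candidates party_lists) := by unfold Pre_tie_break_by_party_order; infer_instance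
def pvWitness_tie_break_by_party_order : List String × (List (String × List String)) :=
  (["b", "a"], [("p1", ["a", "b"]), ("p2", ["b"])])

def Spec_tie_break_by_party_order (tied_candidates : List String) (party_lists : List (String × List String)) (out : String) : Prop := out = tie_break_by_party_order_alt tied_candidates party_lists
instance (tied_candidates : List String) (party_lists : List (String × List String)) (out : String) : Decidable (Spec_tie_break_by_party_order tied_candidates party_lists out) := by unfold Spec_tie_break_by_party_order; infer_instance

-- ===== CLAIM (what is proved, stated in full; the proofs are below) =====
def Claim_equal_tie_break_by_party_order : Prop := ∀ (tied_candidates : List String) (party_lists : List (String × List String)), Dom_tie_break_by_party_order tied_candidates party_lists → Pre_tie_break_by_party_order tied_candidates party_lists → Spec_tie_break_by_party_order tied_candidates party_lists (tie_break_by_party_order tied_candidates party_lists)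

-- ===== LEMMAS AND PROOFS =====

-- merging pairs whose keys avoid c leaves the lookup at c unchanged
theorem pvMerge_get_notmem (ps : List (String × Int)) (t : PySem.Dict String Int) (c : String)
    (h : c ∉ ps.map (·.1)) : (ps.foldl pvBMergeInto t).get? c = t.get? c := by
  induction ps generalizing t with
  | nil => rfl
  | cons kv rest ih =>
    simp only [List.map_cons, List.mem_cons, not_or] at h
    simp only [List.foldl_cons]
    rw [ih _ h.2]
    unfold pvBMergeInto
    cases t.get? kv.1 with
    | none => simp [PySem.Dict.get?_insert_of_ne _ _ h.1]
    | some r0 =>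
      by_cases hlt : kv.2 < r0 <;> simp [hlt, PySem.Dict.get?_insert_of_ne _ _ h.1]

-- merging a key-distinct pair list containing (c, r) yields the min-combination at c
theorem pvMerge_get_mem (ps : List (String × Int)) (t : PySem.Dict String Int) (c : String) (r : Int)
    (hnd : (ps.map (·.1)).Nodup) (hm : (c, r) ∈ ps) :
    (ps.foldl pvBMergeInto t).get? c =
      some (match t.get? c with | none => r | some b => if r < b then r else b) := by
  induction ps generalizing t with
  | nil => cases hm
  | cons kv rest ih =>
    simp only [List.map_cons, List.nodup_cons] at hnd
    simp only [List.foldl_cons]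
    rcases List.mem_cons.mp hm with heq | hmem
    · -- head is (c, r); c does not occur in rest
      have hkc : kv = (c, r) := heq.symm
      subst hkc
      have hnot : c ∉ rest.map (·.1) := hnd.1
      rw [pvMerge_get_notmem _ _ _ hnot]
      unfold pvBMergeInto
      cases ht : t.get? c with
      | none => simp [PySem.Dict.get?_insert_self]
      | some r0 =>
        by_cases hlt : r < r0 <;> simp [hlt, ht, PySem.Dict.get?_insert_self]
    · -- (c, r) in rest, so c ≠ kv.1
      have hcne : c ≠ kv.1 := by
        intro hc
        exact hnd.1 (hc ▸ (List.mem_map.mpr ⟨(c, r), hmem, rfl⟩))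
      have hget : (pvBMergeInto t kv).get? c = t.get? c := by
        unfold pvBMergeInto
        cases t.get? kv.1 with
        | none => simp [PySem.Dict.get?_insert_of_ne _ _ hcne]
        | some r0 =>
          by_cases hlt : kv.2 < r0 <;> simp [hlt, PySem.Dict.get?_insert_of_ne _ _ hcne]
      rw [ih _ hnd.2 hmem, hget]

-- the per-party local dict has distinct keys
theorem pvEnumDict_nodup_keys (lst : List String) : (pvEnumDict lst).keys.Nodup := by
  unfold pvEnumDict
  exact PySem.Dict.nodup_keys_foldl_insert_key (PySem.List.enumerate lst 0)
    (fun ic => ic.2) (fun _ ic => ic.1) PySem.Dict.empty PySem.Dict.nodup_keys_empty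

-- merging one party list into the table acts at each key like A's inner accumulation step
theorem pvMergeList_get (t : PySem.Dict String Int) (lst : List String) (c : String) :
    (pvBMergeList t lst).get? c = pvAInner c (t.get? c) (pvEnumDict lst) := by
  unfold pvBMergeList pvAInner
  have hitems : ((PySem.List.enumerate lst 0).foldl (fun m ic => m.insert ic.2 ic.1) PySem.Dict.empty) = pvEnumDict lst := rfl
  rw [hitems]
  cases h : (pvEnumDict lst).get? c with
  | none =>
    have hnot : c ∉ (pvEnumDict lst).items.map (·.1) :=
      (PySem.Dict.get?_eq_none_iff_not_mem_keys _ _).mp h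
    simp [pvMerge_get_notmem _ _ _ hnot]
  | some r =>
    have hmem : (c, r) ∈ (pvEnumDict lst).items := PySem.Dict.mem_items_of_get?_eq_some _ h
    have hnd : ((pvEnumDict lst).items.map (·.1)).Nodup := pvEnumDict_nodup_keys lst
    rw [pvMerge_get_mem _ _ _ _ hnd hmem]
    cases t.get? c with
    | none => rfl
    | some b => by_cases hlt : r < b <;> simp [hlt]

-- the whole table built by B answers lookups like A's inner fold over the rank maps
theorem pvTable_get (L : List (List String)) (t : PySem.Dict String Int) (c : String) :
    (L.foldl pvBMergeList t).get? c =
      (L.map pvEnumDict).foldl (pvAInner c) (t.get? c) := by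
  induction L generalizing t with
  | nil => rfl
  | cons lst rest ih =>
    simp only [List.foldl_cons, List.map_cons]
    rw [ih, pvMergeList_get]

-- rank_maps.values = the per-party local dicts, in order
theorem pvRankMaps_values (pls : List (String × List String)) :
    (party_rank_maps (PySem.Dict.ofList pls)).values
      = (PySem.Dict.ofList pls).values.map pvEnumDict := by
  unfold party_rank_maps
  have hnd : ((PySem.Dict.ofList pls).items.map (·.1)).Nodup := PySem.Dict.nodup_keys_ofList pls
  have hfresh : ∀ p ∈ (PySem.Dict.ofList pls).items,
      (PySem.Dict.empty : PySem.Dict String (PySem.Dict String Int)).contains p.1 = false := by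
    intro p _; simp [PySem.Dict.contains_empty]
  have h := PySem.Dict.items_foldl_insert_fresh (PySem.Dict.ofList pls).items
      (fun p => p.1) (fun p => pvEnumDict p.2) PySem.Dict.empty hfresh hnd
  simp only [PySem.Dict.values, h]
  simp [List.map_map, Function.comp_def, PySem.Dict.empty]

theorem pvSteps_eq (pls : List (String × List String)) :
    pvAOuter (party_rank_maps (PySem.Dict.ofList pls)).values
      = pvBStep ((PySem.Dict.ofList pls).values.foldl pvBMergeList PySem.Dict.empty) := by
  funext best c
  unfold pvAOuter pvBStep
  rw [pvTable_get, pvRankMaps_values]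
  rfl

-- ===== VERDICT (by name: the statement is the Claim_ definition above) =====
theorem tie_break_by_party_order_spec : Claim_equal_tie_break_by_party_order := by
  intro tied pls _ _
  show tie_break_by_party_order tied pls = tie_break_by_party_order_alt tied pls
  unfold tie_break_by_party_order tie_break_by_party_order_alt
  simp only [pvSteps_eq]
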